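-- pv_equiv track=rewrite | github.com/kyleidea1/CodingTest | 프로그래머스/1/135808. 과일 장수/과일 장수.py | solution
-- ===== SOURCE A (Python) =====
-- def solution(k, m, score):
--     score.sort(reverse = True)
--     split_score = [score[i:i+m] for i in range(0,len(score),m)]
--     ans = 0
--     for s in split_score:
--         if len(s) == m:
--             ans += min(s)*m
--     return ans
-- ===== SOURCE B (Python) =====
-- def solution(k, m, score):
--     score.sort(reverse=True)
--     ans = 0
--     i = m - 1
--     while 0 <= i < len(score):
--         ans += score[i] * m
--         i += m
--     return ans
-- ===== Notes on version B (the rewrite author's own statement) =====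
-- stated objective: simpler
-- what changed: B keeps the in-place descending sort but replaces A's sublist construction and per-box min() scans by a single while loop over the boundary indices i = m-1, 2m-1, ..., adding score[i]*m directly (the minimum of a descending-sorted full box is its last element), so no sublists are built and no box is scanned.
import Mathlib
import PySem

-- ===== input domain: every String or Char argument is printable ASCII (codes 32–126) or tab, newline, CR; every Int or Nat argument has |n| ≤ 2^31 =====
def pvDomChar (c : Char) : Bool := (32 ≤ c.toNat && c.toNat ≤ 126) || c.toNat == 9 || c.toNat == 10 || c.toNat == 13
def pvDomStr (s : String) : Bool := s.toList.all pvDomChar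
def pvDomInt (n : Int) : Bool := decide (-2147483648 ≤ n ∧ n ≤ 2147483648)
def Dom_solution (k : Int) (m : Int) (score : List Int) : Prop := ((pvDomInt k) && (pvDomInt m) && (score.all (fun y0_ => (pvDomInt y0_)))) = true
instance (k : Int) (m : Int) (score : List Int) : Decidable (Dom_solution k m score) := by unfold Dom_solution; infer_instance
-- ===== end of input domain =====

-- B replaces A's sublist chunking and per-box min() scans by a single loop over the
-- box-boundary indices of the descending-sorted list (objective: simpler).
-- Both A and B sort `score` in place (the same mutation); the theorems are about the return value.

-- ===== PORT A =====
-- Python: min(s) raises on an empty list; inside the branch len(s) = m ≠ 0 under Pre_,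
-- so the .getD 0 default below is never the value used on admitted inputs.
def solution (k : Int) (m : Int) (score : List Int) : Int :=
  let s := PySem.List.sorted score (fun x => x) true
  let split := (PySem.List.pyRange 0 (s.length : Int) m).map
      (fun i => PySem.List.slice s (some i) (some (i + m)))
  split.foldl (fun ans c =>
      if (c.length : Int) = m then ans + (PySem.List.min? c (fun x => x)).getD 0 * m else ans) 0

-- ===== PORT B =====
-- the while loop `while 0 <= i < len(score): ans += score[i]*m; i += m`;
-- the extra `0 < m` conjunct is a totality guard only: at the entry point i = m - 1,
-- `0 ≤ i` already forces 0 < m, so it never changes the computed value.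
def solGo (s : List Int) (m : Int) (ans : Int) (i : Int) : Int :=
  if h : 0 ≤ i ∧ i < (s.length : Int) ∧ 0 < m then
    solGo s m (ans + PySem.List.pyGetD s i 0 * m) (i + m)
  else ans
termination_by ((s.length : Int) - i).toNat
decreasing_by omega

def solution_alt (k : Int) (m : Int) (score : List Int) : Int :=
  let s := PySem.List.sorted score (fun x => x) true
  solGo s m 0 (m - 1)

-- ===== PRECONDITION & SPEC =====
-- Pre_ excludes exactly m = 0, where Python A raises ValueError (range() arg 3 must not be zero).
def Pre_solution (k : Int) (m : Int) (score : List Int) : Prop := m ≠ 0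
instance (k : Int) (m : Int) (score : List Int) : Decidable (Pre_solution k m score) := by unfold Pre_solution; infer_instance
def pvWitness_solution : Int × Int × List Int := (0, 2, [1, 4, 2, 2, 3])

def Spec_solution (k : Int) (m : Int) (score : List Int) (out : Int) : Prop := out = solution_alt k m score
instance (k : Int) (m : Int) (score : List Int) (out : Int) : Decidable (Spec_solution k m score out) := by unfold Spec_solution; infer_instance

-- ===== CLAIM (what is proved, stated in full; the proofs are below) =====
def Claim_equal_solution : Prop := ∀ (k : Int) (m : Int) (score : List Int), Dom_solution k m score → Pre_solution k m score → Spec_solution k m score (solution k m score)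

-- ===== LEMMAS AND PROOFS =====

-- one unfolding of B's loop
lemma solGo_eq (s : List Int) (m ans i : Int) :
    solGo s m ans i = if 0 ≤ i ∧ i < (s.length : Int) ∧ 0 < m then
      solGo s m (ans + PySem.List.pyGetD s i 0 * m) (i + m)
    else ans := by
  rw [solGo]
  split_ifs <;> rfl

-- the loop's accumulator splits off
lemma solGo_acc_aux (s : List Int) (m : Int) :
    ∀ N i ans, ((s.length : Int) - i).toNat ≤ N → solGo s m ans i = ans + solGo s m 0 i := by
  intro N
  induction N with
  | zero =>
    intro i ans h
    have hng : ¬ (0 ≤ i ∧ i < (s.length : Int) ∧ 0 < m) := by omega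
    rw [solGo_eq s m ans i, solGo_eq s m 0 i, if_neg hng, if_neg hng]
    ring
  | succ N ih =>
    intro i ans h
    rw [solGo_eq s m ans i, solGo_eq s m 0 i]
    by_cases hg : (0 ≤ i ∧ i < (s.length : Int) ∧ 0 < m)
    · rw [if_pos hg, if_pos hg,
        ih (i + m) (ans + PySem.List.pyGetD s i 0 * m) (by omega),
        ih (i + m) (0 + PySem.List.pyGetD s i 0 * m) (by omega)]
      ring
    · rw [if_neg hg, if_neg hg]; ring

lemma solGo_acc (s : List Int) (m : Int) (ans i : Int) :
    solGo s m ans i = ans + solGo s m 0 i :=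
  solGo_acc_aux s m _ i ans le_rfl

-- running the loop from i+m on s is running it from i on s with the first box dropped
lemma solGo_shift_aux (s : List Int) (m : Int) (hm : 0 < m) :
    ∀ N i ans, 0 ≤ i → ((s.length : Int) - i).toNat ≤ N →
      solGo s m ans (i + m) = solGo (s.drop m.toNat) m ans i := by
  intro N
  induction N with
  | zero =>
    intro i ans hi h
    have h1 : ¬ (0 ≤ i + m ∧ i + m < (s.length : Int) ∧ 0 < m) := by omega
    have h2 : ¬ (0 ≤ i ∧ i < ((s.drop m.toNat).length : Int) ∧ 0 < m) := by
      simp only [List.length_drop]; omega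
    rw [solGo_eq s m ans (i + m), solGo_eq (s.drop m.toNat) m ans i, if_neg h1, if_neg h2]
  | succ N ih =>
    intro i ans hi h
    rw [solGo_eq s m ans (i + m), solGo_eq (s.drop m.toNat) m ans i]
    by_cases hg : (0 ≤ i + m ∧ i + m < (s.length : Int) ∧ 0 < m)
    · have hg' : (0 ≤ i ∧ i < ((s.drop m.toNat).length : Int) ∧ 0 < m) := by
        simp only [List.length_drop]; omega
      rw [if_pos hg, if_pos hg']
      have hget : PySem.List.pyGetD s (i + m) 0 = PySem.List.pyGetD (s.drop m.toNat) i 0 := by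
        rw [PySem.List.pyGetD_eq_getElem s 0 (by omega) (by omega),
            PySem.List.pyGetD_eq_getElem (s.drop m.toNat) 0 (by omega)
              (by simp only [List.length_drop]; omega)]
        rw [List.getElem_drop]
        congr 1
        omega
      rw [hget]
      exact ih (i + m) _ (by omega) (by omega)
    · have hg' : ¬ (0 ≤ i ∧ i < ((s.drop m.toNat).length : Int) ∧ 0 < m) := by
        simp only [List.length_drop]; omega
      rw [if_neg hg, if_neg hg']

lemma solGo_shift (s : List Int) (m : Int) (hm : 0 < m) (ans i : Int) (hi : 0 ≤ i) :
    solGo s m ans (i + m) = solGo (s.drop m.toNat) m ans i :=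
  solGo_shift_aux s m hm _ i ans hi le_rfl

-- the last element of a nonincreasing list bounds it from below
lemma getLast_le_of_desc : ∀ (l : List Int) (hl : l ≠ []),
    l.Pairwise (fun a b => b ≤ a) → ∀ x ∈ l, l.getLast hl ≤ x := by
  intro l
  induction l with
  | nil => intro hl; exact absurd rfl hl
  | cons a t ih =>
    intro _ hp x hx
    rcases List.pairwise_cons.mp hp with ⟨ha, hpt⟩
    rcases eq_or_ne t [] with rfl | ht
    · rcases List.mem_cons.mp hx with rfl | hxt
      · simp
      · simp at hxt
    · rw [List.getLast_cons ht]
      rcases List.mem_cons.mp hx with rfl | hxt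
      · exact le_trans (ih ht hpt _ (List.getLast_mem ht)) (ha _ (List.getLast_mem ht))
      · exact ih ht hpt x hxt

-- minimum of a nonempty nonincreasing list is its last element
lemma min_desc_getLast (l : List Int) (hl : l ≠ [])
    (hp : l.Pairwise (fun a b => b ≤ a)) :
    (PySem.List.min? l (fun x => x)).getD 0 = l.getLast hl := by
  rcases h : PySem.List.min? l (fun x => x) with _ | m0
  · exact absurd ((PySem.List.min?_eq_none_iff l _).mp h) hl
  · have h1 : m0 ≤ l.getLast hl := PySem.List.min?_isMin h _ (List.getLast_mem hl)
    have h2 : l.getLast hl ≤ m0 :=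
      getLast_le_of_desc l hl hp m0 (PySem.List.min?_mem h)
    simp [le_antisymm h1 h2]

-- A's chunk-and-fold, as a function of the sorted list
def aFold (m : Int) (s : List Int) : Int :=
  ((PySem.List.pyRange 0 (s.length : Int) m).map
      (fun i => PySem.List.slice s (some i) (some (i + m)))).foldl
    (fun ans c =>
      if (c.length : Int) = m then ans + (PySem.List.min? c (fun x => x)).getD 0 * m else ans) 0

lemma solution_eq_aFold (k m : Int) (score : List Int) :
    solution k m score = aFold m (PySem.List.sorted score (fun x => x) true) := rfl

lemma solution_alt_eq (k m : Int) (score : List Int) :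
    solution_alt k m score = solGo (PySem.List.sorted score (fun x => x) true) m 0 (m - 1) := rfl

lemma aFold_small (m : Int) (hm : 0 < m) (t : List Int) (h : (t.length : Int) < m) :
    aFold m t = 0 := by
  unfold aFold
  rw [PySem.List.pyRange_of_pos 0 (t.length : Int) hm]
  rcases Nat.eq_zero_or_pos t.length with h0 | h0
  · simp [h0]
  · have hc : (0:Int) < (t.length : Int) := by exact_mod_cast h0
    have h1 : ((t.length : Int) - 0 + m - 1) / m = 1 := by
      rw [← PySem.Int.floordiv_eq_ediv_of_pos hm, PySem.Int.floordiv_eq_iff_of_pos hm]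
      constructor <;> nlinarith
    rw [if_pos hc, h1]
    simp only [Int.toNat_one, List.range_one, List.map_cons, List.map_nil, List.foldl_cons,
      List.foldl_nil]
    have : PySem.List.slice t (some (0 + m * ((0:Nat) : Int))) (some (0 + m * ((0:Nat) : Int) + m))
        = t.take m.toNat := by
      norm_num
      rw [PySem.List.slice_to t (le_of_lt hm)]
    rw [this]
    have hlen : ((t.take m.toNat).length : Int) ≠ m := by
      simp [List.length_take]
      omega
    rw [if_neg hlen]

lemma aFold_step (m : Int) (hm : 0 < m) (t : List Int) (h : m ≤ (t.length : Int)) :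
    aFold m t = (PySem.List.min? (t.take m.toNat) (fun x => x)).getD 0 * m
      + aFold m (t.drop m.toNat) := by
  have hM : (m.toNat : Int) = m := Int.toNat_of_nonneg (le_of_lt hm)
  have hc : (0:Int) < (t.length : Int) := by omega
  unfold aFold
  rw [PySem.List.pyRange_of_pos 0 (t.length : Int) hm,
      PySem.List.pyRange_of_pos 0 ((t.drop m.toNat).length : Int) hm, if_pos hc]
  have hK : (((t.length : Int) - 0 + m - 1) / m).toNat = (((t.length : Int) - 1) / m).toNat + 1 := by
    have e1 : (t.length : Int) - 0 + m - 1 = ((t.length : Int) - 1) + 1 * m := by ring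
    rw [e1, Int.add_mul_ediv_right _ _ (ne_of_gt hm)]
    have : 0 ≤ ((t.length : Int) - 1) / m := Int.ediv_nonneg (by omega) (le_of_lt hm)
    omega
  have hKd : (if (0:Int) < ((t.drop m.toNat).length : Int) then
      ((((t.drop m.toNat).length : Int) - 0 + m - 1) / m).toNat else 0)
      = (((t.length : Int) - 1) / m).toNat := by
    have hdl : (((t.drop m.toNat).length : Int)) = (t.length : Int) - m := by
      simp only [List.length_drop]; omega
    rw [hdl]
    by_cases hlt : (0:Int) < (t.length : Int) - m
    · rw [if_pos hlt]
      congr 2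
      ring
    · rw [if_neg hlt]
      have : ((t.length : Int) - 1) / m = 0 := by
        rw [← PySem.Int.floordiv_eq_ediv_of_pos hm, PySem.Int.floordiv_eq_iff_of_pos hm]
        constructor <;> nlinarith
      omega
  rw [hK, hKd, List.range_succ_eq_map]
  simp only [List.map_cons, List.map_map, List.foldl_cons]
  have hhead : PySem.List.slice t (some ((0:Int) + m * ((0:Nat) : Int))) (some (0 + m * ((0:Nat):Int) + m))
      = t.take m.toNat := by
    norm_num
    rw [PySem.List.slice_to t (le_of_lt hm)]
  have hheadlen : (((t.take m.toNat).length : Int)) = m := by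
    simp [List.length_take]
    omega
  rw [hhead, if_pos hheadlen, zero_add]
  have htail : (List.range (((t.length : Int) - 1) / m).toNat).map
        ((fun i => PySem.List.slice t (some i) (some (i + m))) ∘ ((fun k : Nat => (0:Int) + m * (k:Int)) ∘ Nat.succ))
      = (List.range (((t.length : Int) - 1) / m).toNat).map
        ((fun i => PySem.List.slice (t.drop m.toNat) (some i) (some (i + m))) ∘ (fun k : Nat => (0:Int) + m * (k:Int))) := by
    apply List.map_congr_left
    intro k _
    simp only [Function.comp_apply]
    have e2 : ((0:Int) + m * ((Nat.succ k : Nat) : Int)) = (0 + m * (k:Int)) + m := by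
      push_cast; ring
    rw [e2]
    generalize hq0 : (0:Int) + m * (k:Int) = q
    have hq : (0:Int) ≤ q := by rw [← hq0]; positivity
    rw [PySem.List.slice_toNat t (by omega) (by omega),
        PySem.List.slice_toNat (t.drop m.toNat) (by omega) (by omega)]
    rw [List.drop_drop]
    have e4 : (q + m + m).toNat - (q + m).toNat = (q + m).toNat - q.toNat := by omega
    have e3 : (q + m).toNat = m.toNat + q.toNat := by omega
    rw [e4, e3]
  rw [htail]
  have extract : ∀ (l : List (List Int)) (v : Int),
      l.foldl (fun ans c => if (c.length : Int) = m then ans + (PySem.List.min? c (fun x => x)).getD 0 * m else ans) v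
      = v + l.foldl (fun ans c => if (c.length : Int) = m then ans + (PySem.List.min? c (fun x => x)).getD 0 * m else ans) 0 := by
    intro l v
    rw [PySem.List.foldl_ite_eq_foldl_filter (fun c : List Int => ((c.length : Int) = m))
          (fun ans c => ans + (PySem.List.min? c (fun x => x)).getD 0 * m) l v,
        PySem.List.foldl_ite_eq_foldl_filter (fun c : List Int => ((c.length : Int) = m))
          (fun ans c => ans + (PySem.List.min? c (fun x => x)).getD 0 * m) l 0,
        PySem.List.foldl_add, PySem.List.foldl_add]
    ring
  rw [extract]

-- the heart: on a nonincreasing list, A's chunked fold is B's boundary-index loop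
lemma main_aux (m : Int) (hm : 0 < m) :
    ∀ n (t : List Int), t.length = n → t.Pairwise (fun a b => b ≤ a) →
      aFold m t = solGo t m 0 (m - 1) := by
  intro n
  induction n using Nat.strong_induction_on with
  | _ n ih =>
    intro t hlen hp
    by_cases hle : m ≤ (t.length : Int)
    · rw [aFold_step m hm t hle]
      have hg : (0 ≤ m - 1 ∧ m - 1 < (t.length : Int) ∧ 0 < m) := ⟨by omega, by omega, hm⟩
      rw [solGo_eq t m 0 (m - 1), if_pos hg]
      rw [solGo_shift t m hm _ (m - 1) (by omega), solGo_acc]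
      have hdlt : (t.drop m.toNat).length < n := by
        rw [List.length_drop, ← hlen]
        omega
      rw [← ih (t.drop m.toNat).length hdlt _ rfl (hp.drop)]
      have htake : t.take m.toNat ≠ [] := by
        have : (t.take m.toNat).length = m.toNat := by simp [List.length_take]; omega
        intro hnil
        rw [hnil] at this
        simp at this
        omega
      rw [min_desc_getLast (t.take m.toNat) htake (hp.sublist (List.take_sublist _ _))]
      have hlast : (t.take m.toNat).getLast htake = PySem.List.pyGetD t (m - 1) 0 := by
        rw [List.getLast_eq_getElem, PySem.List.pyGetD_eq_getElem t 0 (by omega) (by omega)]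
        rw [List.getElem_take]
        congr 1
        simp [List.length_take]
        omega
      rw [hlast]
      ring
    · rw [aFold_small m hm t (by omega), solGo_eq t m 0 (m - 1), if_neg (by omega)]

-- ===== VERDICT (by name: the statement is the Claim_ definition above) =====
theorem solution_spec : Claim_equal_solution := by
  intro k m score _ hpre
  unfold Spec_solution
  rw [solution_eq_aFold, solution_alt_eq]
  rcases lt_or_gt_of_ne hpre with hneg | hpos
  · have h1 : ¬ ((0:Int) < m) := by omega
    have h0 : m ≠ 0 := hpre
    have h2 : ¬ ((score.length : Int) < 0) := by omega
    rw [solGo_eq _ m 0 (m - 1), if_neg (by omega)]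
    unfold aFold
    simp [PySem.List.pyRange, h1, h0, h2]
  · exact main_aux m hpos _ _ rfl (PySem.List.sorted_pairwise_rev score (fun x => x))
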